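-- pv_equiv track=rewrite | github.com/AlphaBravo227/CrewOps360 | modules/pdf_generator.py | count_shifts_comprehensive
-- ===== SOURCE A (Python) =====
-- def count_shifts_comprehensive(track_data, preassignments=None):
--     """
--     FIXED: Comprehensive shift counting including all AT assignments
--
--     Args:
--         track_data (dict): Dictionary of day -> assignment
--         preassignments (dict, optional): Dictionary of day -> preassignment value
--
--     Returns:
--         tuple: (total_shifts, day_shifts, night_shifts, at_shifts)
--     """
--     total_shifts = 0
--     day_shifts = 0
--     night_shifts = 0
--     at_shifts = 0
--
--     # Get all possible days from both sources
--     all_days = set()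
--     if track_data:
--         all_days.update(track_data.keys())
--     if preassignments:
--         all_days.update(preassignments.keys())
--
--     # Count shifts for each day, prioritizing track_data over preassignments
--     for day in all_days:
--         assignment = None
--
--         # Check track_data first
--         if day in track_data and track_data[day]:
--             assignment = track_data[day]
--         elif preassignments and day in preassignments and preassignments[day]:
--             assignment = preassignments[day]
--
--         # Count based on assignment
--         if assignment == "D":
--             day_shifts += 1
--             total_shifts += 1
--         elif assignment == "N":
--             night_shifts += 1
--             total_shifts += 1
--         elif assignment == "AT":
--             at_shifts += 1
--             total_shifts += 1
--
--     return total_shifts, day_shifts, night_shifts, at_shifts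
-- ===== SOURCE B (Python) =====
-- def count_shifts_comprehensive(track_data, preassignments=None):
--     """Two direct passes instead of a union-of-keys set loop: count track_data
--     values first, then preassignment values that are not overridden by a truthy
--     track_data entry; total is the sum of the three counters."""
--     day_shifts = 0
--     night_shifts = 0
--     at_shifts = 0
--     if track_data:
--         for day, value in track_data.items():
--             if value == "D":
--                 day_shifts += 1
--             elif value == "N":
--                 night_shifts += 1
--             elif value == "AT":
--                 at_shifts += 1
--     if preassignments:
--         for day, value in preassignments.items():
--             if value and not (day in track_data and track_data[day]):
--                 if value == "D":
--                     day_shifts += 1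
--                 elif value == "N":
--                     night_shifts += 1
--                 elif value == "AT":
--                     at_shifts += 1
--     total_shifts = day_shifts + night_shifts + at_shifts
--     return total_shifts, day_shifts, night_shifts, at_shifts
-- ===== Notes on version B (the rewrite author's own statement) =====
-- stated objective: simpler
-- what changed: Replaces the union-of-keys set construction plus per-day dict lookups with two direct passes over the dicts' items (track values first, then preassignment values not overridden by a truthy track entry), deriving total_shifts as the sum of the three counters.
import Mathlib
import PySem

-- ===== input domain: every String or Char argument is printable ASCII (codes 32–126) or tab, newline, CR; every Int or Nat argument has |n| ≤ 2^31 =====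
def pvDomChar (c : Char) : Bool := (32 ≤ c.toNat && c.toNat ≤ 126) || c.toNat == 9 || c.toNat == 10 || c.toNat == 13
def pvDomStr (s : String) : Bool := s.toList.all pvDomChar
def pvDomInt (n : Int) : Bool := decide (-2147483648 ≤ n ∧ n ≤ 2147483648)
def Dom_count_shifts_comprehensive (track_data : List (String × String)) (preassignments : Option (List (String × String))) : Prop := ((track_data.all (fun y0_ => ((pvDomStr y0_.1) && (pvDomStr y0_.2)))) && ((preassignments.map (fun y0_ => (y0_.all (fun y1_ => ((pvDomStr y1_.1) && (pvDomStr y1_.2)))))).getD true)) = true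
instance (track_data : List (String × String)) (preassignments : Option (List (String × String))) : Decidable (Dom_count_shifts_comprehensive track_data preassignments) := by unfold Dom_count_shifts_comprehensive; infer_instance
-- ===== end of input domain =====

-- B replaces A's union-of-keys set loop by two direct passes over the items lists; objective: simpler.


-- ===== PORT A =====
-- assignment chosen for one day: track_data first (if truthy), else a truthy preassignment
def pvAsg (track_data : List (String × String)) (preassignments : Option (List (String × String))) (day : String) : Option String :=
  let tval := (PySem.Dict.mk track_data).getD day ""
  if tval ≠ "" then some tval
  else match preassignments with
    | some p =>
      let pval := (PySem.Dict.mk p).getD day ""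
      if p ≠ [] ∧ pval ≠ "" then some pval else none
    | none => none

-- one iteration of A's counting loop (state = (total, day, night, at))
def pvCountStep (track_data : List (String × String)) (preassignments : Option (List (String × String)))
    (st : Int × Int × Int × Int) (day : String) : Int × Int × Int × Int :=
  let assignment := pvAsg track_data preassignments day
  if assignment = some "D" then (st.1 + 1, st.2.1 + 1, st.2.2.1, st.2.2.2)
  else if assignment = some "N" then (st.1 + 1, st.2.1, st.2.2.1 + 1, st.2.2.2)
  else if assignment = some "AT" then (st.1 + 1, st.2.1, st.2.2.1, st.2.2.2 + 1)
  else st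

def count_shifts_comprehensive (track_data : List (String × String)) (preassignments : Option (List (String × String))) : Int × Int × Int × Int :=
  let s0 : PySem.Set String := PySem.Set.empty
  let s1 := if track_data ≠ [] then PySem.Set.update s0 (track_data.map Prod.fst) else s0
  let all_days := match preassignments with
    | some p => if p ≠ [] then PySem.Set.update s1 (p.map Prod.fst) else s1
    | none => s1
  List.foldl (pvCountStep track_data preassignments) (0, 0, 0, 0) all_days

-- ===== PORT B =====
-- count one value into (day, night, at)
def pvBump (value : String) (st : Int × Int × Int) : Int × Int × Int :=
  if value = "D" then (st.1 + 1, st.2.1, st.2.2)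
  else if value = "N" then (st.1, st.2.1 + 1, st.2.2)
  else if value = "AT" then (st.1, st.2.1, st.2.2 + 1)
  else st

def count_shifts_comprehensive_alt (track_data : List (String × String)) (preassignments : Option (List (String × String))) : Int × Int × Int × Int :=
  let s0 : Int × Int × Int := (0, 0, 0)
  let s1 := if track_data ≠ [] then track_data.foldl (fun st pr => pvBump pr.2 st) s0 else s0
  let s2 := match preassignments with
    | some p =>
      if p ≠ [] then
        p.foldl (fun st (q : String × String) =>
          if q.2 ≠ "" ∧ ¬((PySem.Dict.mk track_data).contains q.1 = true ∧ (PySem.Dict.mk track_data).getD q.1 "" ≠ "")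
          then pvBump q.2 st else st) s1
      else s1
    | none => s1
  (s2.1 + s2.2.1 + s2.2.2, s2.1, s2.2.1, s2.2.2)

-- ===== PRECONDITION & SPEC =====
-- Pre_ admits exactly the association lists that represent Python dicts (no duplicate keys);
-- a Python dict argument can never contain a duplicate key, so no input A accepts is excluded.
def Pre_count_shifts_comprehensive (track_data : List (String × String)) (preassignments : Option (List (String × String))) : Prop :=
  (track_data.map Prod.fst).Nodup ∧ ((preassignments.getD []).map Prod.fst).Nodup
instance (track_data : List (String × String)) (preassignments : Option (List (String × String))) : Decidable (Pre_count_shifts_comprehensive track_data preassignments) := by unfold Pre_count_shifts_comprehensive; infer_instance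
def pvWitness_count_shifts_comprehensive : (List (String × String)) × (Option (List (String × String))) :=
  ([("Mon", "D"), ("Tue", "N")], some [("Wed", "AT"), ("Mon", "")])

def Spec_count_shifts_comprehensive (track_data : List (String × String)) (preassignments : Option (List (String × String))) (out : Int × Int × Int × Int) : Prop := out = count_shifts_comprehensive_alt track_data preassignments
instance (track_data : List (String × String)) (preassignments : Option (List (String × String))) (out : Int × Int × Int × Int) : Decidable (Spec_count_shifts_comprehensive track_data preassignments out) := by unfold Spec_count_shifts_comprehensive; infer_instance

-- ===== CLAIM (what is proved, stated in full; the proofs are below) =====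
def Claim_equal_count_shifts_comprehensive : Prop := ∀ (track_data : List (String × String)) (preassignments : Option (List (String × String))), Dom_count_shifts_comprehensive track_data preassignments → Pre_count_shifts_comprehensive track_data preassignments → Spec_count_shifts_comprehensive track_data preassignments (count_shifts_comprehensive track_data preassignments)

-- ===== LEMMAS AND PROOFS =====

-- dict lookup with default "" (Python truthiness: a value is truthy iff ≠ "")
def pvGetD (l : List (String × String)) (d : String) : String := (PySem.Dict.mk l).getD d ""

theorem pvKeys_mk (l : List (String × String)) : (PySem.Dict.mk l).keys = l.map Prod.fst := rfl

theorem pvGetD_mem {l : List (String × String)} (h : (l.map Prod.fst).Nodup)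
    {q : String × String} (hm : q ∈ l) : pvGetD l q.1 = q.2 := by
  exact PySem.Dict.getD_of_mem_items (PySem.Dict.mk l) hm (by rw [pvKeys_mk]; exact h) ""

theorem pvGetD_not_mem {l : List (String × String)} {d : String}
    (h : d ∉ l.map Prod.fst) : pvGetD l d = "" := by
  refine PySem.Dict.getD_of_not_contains (PySem.Dict.mk l) "" ?_
  rw [PySem.Dict.contains_eq_decide_mem_keys, pvKeys_mk]
  simpa using h

theorem pvGetD_ne_mem {l : List (String × String)} {d : String}
    (h : pvGetD l d ≠ "") : d ∈ l.map Prod.fst := by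
  by_contra hc
  exact h (pvGetD_not_mem hc)

theorem pv_countP_or {α : Type} (p q : α → Bool) (L : List α)
    (h : ∀ x ∈ L, ¬(p x = true ∧ q x = true)) :
    L.countP (fun x => p x || q x) = L.countP p + L.countP q := by
  induction L with
  | nil => simp
  | cons x L ih =>
    simp only [List.countP_cons, List.mem_cons] at *
    have hx := h x (Or.inl rfl)
    have := ih (fun y hy => h y (Or.inr hy))
    cases hp : p x <;> cases hq : q x <;> simp [hp, hq] at hx ⊢ <;> omega

theorem pv_countP_trans {α : Type} [DecidableEq α] (p q : α → Bool) (L1 L2 : List α)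
    (h1 : L1.Nodup) (h2 : L2.Nodup)
    (h : ∀ x, (x ∈ L1 ∧ p x = true) ↔ (x ∈ L2 ∧ q x = true)) : L1.countP p = L2.countP q := by
  rw [List.countP_eq_length_filter, List.countP_eq_length_filter]
  exact List.Perm.length_eq ((List.perm_ext_iff_of_nodup (h1.filter _) (h2.filter _)).2 (by
    intro x; simp only [List.mem_filter]; exact h x))

-- A's loop: each day contributes to exactly the counter named by its assignment
theorem pv_foldl_countStep (td : List (String × String)) (pre : Option (List (String × String)))
    (L : List String) (t d n a : Int) :
    L.foldl (pvCountStep td pre) (t, d, n, a) =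
      (t + L.countP (fun x => decide (pvAsg td pre x = some "D"))
         + L.countP (fun x => decide (pvAsg td pre x = some "N"))
         + L.countP (fun x => decide (pvAsg td pre x = some "AT")),
       d + L.countP (fun x => decide (pvAsg td pre x = some "D")),
       n + L.countP (fun x => decide (pvAsg td pre x = some "N")),
       a + L.countP (fun x => decide (pvAsg td pre x = some "AT"))) := by
  induction L generalizing t d n a with
  | nil => simp
  | cons x L ih =>
    simp only [List.foldl_cons, List.countP_cons]
    rw [show pvCountStep td pre (t, d, n, a) x =
        (if pvAsg td pre x = some "D" then (t + 1, d + 1, n, a)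
         else if pvAsg td pre x = some "N" then (t + 1, d, n + 1, a)
         else if pvAsg td pre x = some "AT" then (t + 1, d, n, a + 1)
         else (t, d, n, a)) from rfl]
    split_ifs <;>
      (simp only [ih, Prod.mk.injEq]; refine ⟨?_, ?_, ?_, ?_⟩ <;> (simp_all; try push_cast) <;> try ring)

-- B's first pass counts values directly
theorem pv_foldl_bump (l : List (String × String)) (d n a : Int) :
    l.foldl (fun st pr => pvBump pr.2 st) (d, n, a) =
      (d + l.countP (fun pr => decide (pr.2 = "D")),
       n + l.countP (fun pr => decide (pr.2 = "N")),
       a + l.countP (fun pr => decide (pr.2 = "AT"))) := by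
  induction l generalizing d n a with
  | nil => simp
  | cons x l ih =>
    simp only [List.foldl_cons, List.countP_cons]
    rw [show pvBump x.2 (d, n, a) =
        (if x.2 = "D" then (d + 1, n, a)
         else if x.2 = "N" then (d, n + 1, a)
         else if x.2 = "AT" then (d, n, a + 1)
         else (d, n, a)) from rfl]
    split_ifs <;>
      (simp only [ih, Prod.mk.injEq]; refine ⟨?_, ?_, ?_⟩ <;> (simp_all; try push_cast) <;> try ring)

-- B's second pass: a guarded pass counts guarded values
theorem pv_foldl_bump_if (C : String × String → Prop) [DecidablePred C]
    (l : List (String × String)) (d n a : Int) :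
    l.foldl (fun st (q : String × String) => if C q then pvBump q.2 st else st) (d, n, a) =
      (d + l.countP (fun q => decide (C q ∧ q.2 = "D")),
       n + l.countP (fun q => decide (C q ∧ q.2 = "N")),
       a + l.countP (fun q => decide (C q ∧ q.2 = "AT"))) := by
  induction l generalizing d n a with
  | nil => simp
  | cons x l ih =>
    simp only [List.foldl_cons, List.countP_cons]
    by_cases hC : C x
    · rw [if_pos hC]
      rw [show pvBump x.2 (d, n, a) =
          (if x.2 = "D" then (d + 1, n, a)
           else if x.2 = "N" then (d, n + 1, a)
           else if x.2 = "AT" then (d, n, a + 1)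
           else (d, n, a)) from rfl]
      split_ifs <;>
        (simp only [ih, Prod.mk.injEq]; refine ⟨?_, ?_, ?_⟩ <;> (simp_all; try push_cast) <;> try ring)
    · rw [if_neg hC]
      simp only [ih, hC, Prod.mk.injEq]
      refine ⟨by simp_all, by simp_all, by simp_all⟩

theorem pvGetD_nil (d : String) : pvGetD [] d = "" := rfl

theorem pv_contains_of_ne {l : List (String × String)} {d : String}
    (h : pvGetD l d ≠ "") : (PySem.Dict.mk l).contains d = true := by
  by_contra hc
  exact h (PySem.Dict.getD_of_not_contains (PySem.Dict.mk l) "" (by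
    cases hcc : (PySem.Dict.mk l).contains d
    · rfl
    · exact absurd hcc hc))

-- characterization of A's per-day assignment, for a truthy target value v
theorem pvAsg_eq_some (td p : List (String × String)) (x v : String) (hv : v ≠ "") :
    (pvAsg td (some p) x = some v) ↔ (pvGetD td x = v ∨ (pvGetD td x = "" ∧ pvGetD p x = v)) := by
  show ((if pvGetD td x ≠ "" then some (pvGetD td x)
        else if p ≠ [] ∧ pvGetD p x ≠ "" then some (pvGetD p x) else none) = some v) ↔ _
  by_cases ht : pvGetD td x = ""
  · rw [if_neg (by simp [ht])]
    by_cases hp0 : p = []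
    · subst hp0
      rw [if_neg (by simp)]
      simp [pvGetD_nil, ht, Ne.symm hv]
    · by_cases hpv : pvGetD p x = ""
      · rw [if_neg (by simp [hpv])]
        simp [ht, hpv, Ne.symm hv]
      · rw [if_pos ⟨hp0, hpv⟩]
        simp [ht, Ne.symm hv]
  · rw [if_pos ht]
    constructor
    · intro h; exact Or.inl (by injection h)
    · rintro (h | ⟨h1, _⟩)
      · exact congrArg some h
      · exact absurd h1 ht

-- B's track-pass count, transported to the key list
theorem pv_count_track (td : List (String × String)) (htd : (td.map Prod.fst).Nodup) (v : String) :
    td.countP (fun pr => decide (pr.2 = v))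
      = (td.map Prod.fst).countP (fun x => decide (pvGetD td x = v)) := by
  rw [List.countP_map]
  exact (List.countP_congr (fun pr hpr => by
    simp only [Function.comp, decide_eq_true_eq]
    rw [pvGetD_mem htd hpr])).symm

-- the central counting identity, per truthy value v
theorem pv_count_key (td p : List (String × String))
    (htd : (td.map Prod.fst).Nodup) (hp : (p.map Prod.fst).Nodup) (v : String) (hv : v ≠ "") :
    ((td.map Prod.fst) ++ (p.map Prod.fst).filter
        (fun y => !(PySem.Set.contains (td.map Prod.fst) y))).countP
      (fun x => decide (pvAsg td (some p) x = some v))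
    = td.countP (fun pr => decide (pr.2 = v))
      + p.countP (fun q => decide ((q.2 ≠ "" ∧ ¬((PySem.Dict.mk td).contains q.1 = true ∧
          (PySem.Dict.mk td).getD q.1 "" ≠ "")) ∧ q.2 = v)) := by
  rw [List.countP_append, List.countP_filter]
  -- A's count over the track keys splits into "track says v" and "track empty, preassignment says v"
  have hA1 : (td.map Prod.fst).countP (fun x => decide (pvAsg td (some p) x = some v))
      = (td.map Prod.fst).countP (fun x => decide (pvGetD td x = v))
        + (td.map Prod.fst).countP (fun x => decide (pvGetD td x = "" ∧ pvGetD p x = v)) := by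
    rw [List.countP_congr (q := fun x => decide (pvGetD td x = v) ||
          decide (pvGetD td x = "" ∧ pvGetD p x = v))
        (fun x _ => by simp [pvAsg_eq_some td p x v hv])]
    exact pv_countP_or _ _ _ (fun x _ ⟨h1, h2⟩ => by
      simp only [decide_eq_true_eq] at h1 h2
      exact hv (h1 ▸ h2.1))
  -- A's count over the remaining preassignment keys
  have hA2 : (p.map Prod.fst).countP (fun x => decide (pvAsg td (some p) x = some v) &&
        !(PySem.Set.contains (td.map Prod.fst) x))
      = (p.map Prod.fst).countP (fun x => decide (pvGetD p x = v ∧ x ∉ td.map Prod.fst)) := by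
    refine List.countP_congr (fun x _ => ?_)
    by_cases hm : x ∈ td.map Prod.fst
    · simp [hm, List.contains_eq_mem]
    · have ht : pvGetD td x = "" := pvGetD_not_mem hm
      simp [hm, List.contains_eq_mem, pvAsg_eq_some td p x v hv, ht, Ne.symm hv]
  -- B's track-pass count, transported to the key list
  have hB1 := pv_count_track td htd v
  -- B's preassignment-pass count, transported to the key list
  have hB2 : p.countP (fun q => decide ((q.2 ≠ "" ∧ ¬((PySem.Dict.mk td).contains q.1 = true ∧
          (PySem.Dict.mk td).getD q.1 "" ≠ "")) ∧ q.2 = v))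
      = (p.map Prod.fst).countP (fun x => decide (pvGetD p x = v ∧ pvGetD td x = "")) := by
    rw [List.countP_map]
    refine List.countP_congr (fun q hq => ?_)
    have hqv : q.2 = pvGetD p q.1 := (pvGetD_mem hp hq).symm
    simp only [Function.comp, decide_eq_true_eq]
    constructor
    · rintro ⟨⟨hne, hnc⟩, hqv2⟩
      refine ⟨hqv ▸ hqv2, ?_⟩
      by_contra htne
      exact hnc ⟨pv_contains_of_ne htne, htne⟩
    · rintro ⟨hpg, htg⟩
      have : q.2 = v := hqv ▸ hpg
      exact ⟨⟨this ▸ hv, fun ⟨_, htne⟩ => htne htg⟩, this⟩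
  -- split B's preassignment count by membership in the track keys
  have hB3 : (p.map Prod.fst).countP (fun x => decide (pvGetD p x = v ∧ pvGetD td x = ""))
      = (td.map Prod.fst).countP (fun x => decide (pvGetD td x = "" ∧ pvGetD p x = v))
        + (p.map Prod.fst).countP (fun x => decide (pvGetD p x = v ∧ x ∉ td.map Prod.fst)) := by
    rw [List.countP_congr (q := fun x => decide ((pvGetD p x = v ∧ pvGetD td x = "") ∧ x ∈ td.map Prod.fst) ||
          decide (pvGetD p x = v ∧ x ∉ td.map Prod.fst))
        (fun x hx => by
          by_cases hm : x ∈ td.map Prod.fst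
          · simp [hm]
          · simp [hm, pvGetD_not_mem hm]),
        pv_countP_or _ _ _ (fun x _ ⟨h1, h2⟩ => by
          simp only [decide_eq_true_eq] at h1 h2
          exact h2.2 h1.2)]
    congr 1
    exact pv_countP_trans _ _ _ _ hp htd (fun x => by
      simp only [decide_eq_true_eq]
      constructor
      · rintro ⟨_, ⟨hpg, htg⟩, hm⟩; exact ⟨hm, htg, hpg⟩
      · rintro ⟨hm, htg, hpg⟩; exact ⟨pvGetD_ne_mem (by rw [hpg]; exact hv), ⟨hpg, htg⟩, hm⟩)
  rw [hA1, hA2, hB1, hB2, hB3]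
  omega

theorem pv_s1_eq (td : List (String × String)) (htd : (td.map Prod.fst).Nodup) :
    (if td ≠ [] then PySem.Set.update PySem.Set.empty (td.map Prod.fst) else PySem.Set.empty)
      = td.map Prod.fst := by
  by_cases h : td = []
  · simp [h]
  · rw [if_pos h, PySem.Set.update_empty, PySem.Set.ofList_eq_self_of_nodup _ htd]

theorem pv_bfold_eq (td : List (String × String)) :
    (if td ≠ [] then td.foldl (fun st pr => pvBump pr.2 st) ((0 : Int), (0 : Int), (0 : Int)) else ((0 : Int), (0 : Int), (0 : Int)))
      = td.foldl (fun st pr => pvBump pr.2 st) ((0 : Int), (0 : Int), (0 : Int)) := by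
  by_cases h : td = [] <;> simp [h]

theorem count_shifts_main (td p : List (String × String))
    (htd : (td.map Prod.fst).Nodup) (hp : (p.map Prod.fst).Nodup) :
    count_shifts_comprehensive td (some p) = count_shifts_comprehensive_alt td (some p) := by
  simp only [count_shifts_comprehensive, count_shifts_comprehensive_alt]
  rw [pv_s1_eq td htd, pv_bfold_eq td]
  have hdays : (if p ≠ [] then PySem.Set.update (td.map Prod.fst) (p.map Prod.fst) else td.map Prod.fst)
      = (td.map Prod.fst) ++ (p.map Prod.fst).filter (fun y => !(PySem.Set.contains (td.map Prod.fst) y)) := by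
    by_cases h : p = []
    · simp [h]
    · rw [if_pos h, PySem.Set.update_eq_append_filter, PySem.Set.ofList_eq_self_of_nodup _ hp]
  rw [hdays]
  have hpfold : ∀ (st : Int × Int × Int),
      (if p ≠ [] then p.foldl (fun st (q : String × String) =>
          if q.2 ≠ "" ∧ ¬((PySem.Dict.mk td).contains q.1 = true ∧ (PySem.Dict.mk td).getD q.1 "" ≠ "")
          then pvBump q.2 st else st) st else st)
        = p.foldl (fun st (q : String × String) =>
          if q.2 ≠ "" ∧ ¬((PySem.Dict.mk td).contains q.1 = true ∧ (PySem.Dict.mk td).getD q.1 "" ≠ "")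
          then pvBump q.2 st else st) st := by
    intro st
    by_cases h : p = [] <;> simp [h]
  rw [hpfold]
  rw [pv_foldl_countStep, pv_foldl_bump, pv_foldl_bump_if
    (C := fun q : String × String => q.2 ≠ "" ∧ ¬((PySem.Dict.mk td).contains q.1 = true ∧ (PySem.Dict.mk td).getD q.1 "" ≠ ""))]
  have hD := pv_count_key td p htd hp "D" (by decide)
  have hN := pv_count_key td p htd hp "N" (by decide)
  have hA := pv_count_key td p htd hp "AT" (by decide)
  simp only [Prod.mk.injEq]
  first | trivial | omega

theorem count_shifts_none (td : List (String × String)) (htd : (td.map Prod.fst).Nodup) :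
    count_shifts_comprehensive td none = count_shifts_comprehensive_alt td none := by
  simp only [count_shifts_comprehensive, count_shifts_comprehensive_alt]
  rw [pv_s1_eq td htd, pv_bfold_eq td]
  rw [pv_foldl_countStep, pv_foldl_bump]
  have hasg : ∀ (v : String), v ≠ "" →
      (td.map Prod.fst).countP (fun x => decide (pvAsg td none x = some v))
        = td.countP (fun pr => decide (pr.2 = v)) := by
    intro v hv
    rw [pv_count_track td htd v]
    refine List.countP_congr (fun x _ => ?_)
    simp only [decide_eq_true_eq]
    show ((if pvGetD td x ≠ "" then some (pvGetD td x) else none) = some v) ↔ _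
    by_cases ht : pvGetD td x = ""
    · rw [if_neg (by simp [ht])]
      simp [ht, Ne.symm hv]
    · rw [if_pos ht]
      constructor
      · intro h; injection h
      · exact congrArg some
  rw [hasg "D" (by decide), hasg "N" (by decide), hasg "AT" (by decide)]
  simp only [Prod.mk.injEq]
  exact ⟨by omega, trivial⟩

-- ===== VERDICT (by name: the statement is the Claim_ definition above) =====
theorem count_shifts_comprehensive_spec : Claim_equal_count_shifts_comprehensive := by
  intro td pre _ hpre
  unfold Spec_count_shifts_comprehensive
  obtain ⟨htd, hp⟩ := hpre
  match pre with
  | none => exact count_shifts_none td htd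
  | some p => exact count_shifts_main td p htd hp
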